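-- pv_equiv track=rewrite | github.com/Quikks1lver/advent-of-code | 2025/day01.py | part1
-- ===== SOURCE A (Python) =====
-- from typing import List, Tuple
--
-- def part1(input: List[Tuple[str, int]]) -> int:
--    curr_position = 50
--    num_zeros = 0
--
--    for item in input:
--       modded_value = item[1] % 100
--
--       if item[0] == 'R':
--          curr_position += modded_value
--       else: # 'L'
--          temp_pos = curr_position - modded_value
--          if temp_pos < 0:
--             temp_pos += 100
--          curr_position = temp_pos
--
--       curr_position %= 100
--
--       if curr_position == 0:
--          num_zeros += 1
--
--    return num_zeros
-- ===== SOURCE B (Python) =====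
-- from typing import List, Tuple
--
-- def part1(input: List[Tuple[str, int]]) -> int:
--     deltas = [n % 100 if d == 'R' else -(n % 100) for d, n in input]
--
--     def solve(ds: List[int], start: int) -> Tuple[int, int]:
--         """For the segment ds entered at position `start`, return
--         (#positions ≡ 0 mod 100 at the end of each prefix, total displacement)."""
--         if not ds:
--             return (0, 0)
--         if len(ds) == 1:
--             return (int((start + ds[0]) % 100 == 0), ds[0])
--         mid = len(ds) // 2
--         c1, s1 = solve(ds[:mid], start)
--         c2, s2 = solve(ds[mid:], start + s1)
--         return (c1 + c2, s1 + s2)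
--
--     return solve(deltas, 50)[0]
-- ===== Notes on version B (the rewrite author's own statement) =====
-- stated objective: alternative
-- what changed: Replaces the sequential stateful scan with a divide-and-conquer: moves become signed deltas, the segment is split in half and each half is solved recursively, returning (zero-count, segment displacement); halves are combined by offsetting the right half's start with the left half's displacement.
import Mathlib
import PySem

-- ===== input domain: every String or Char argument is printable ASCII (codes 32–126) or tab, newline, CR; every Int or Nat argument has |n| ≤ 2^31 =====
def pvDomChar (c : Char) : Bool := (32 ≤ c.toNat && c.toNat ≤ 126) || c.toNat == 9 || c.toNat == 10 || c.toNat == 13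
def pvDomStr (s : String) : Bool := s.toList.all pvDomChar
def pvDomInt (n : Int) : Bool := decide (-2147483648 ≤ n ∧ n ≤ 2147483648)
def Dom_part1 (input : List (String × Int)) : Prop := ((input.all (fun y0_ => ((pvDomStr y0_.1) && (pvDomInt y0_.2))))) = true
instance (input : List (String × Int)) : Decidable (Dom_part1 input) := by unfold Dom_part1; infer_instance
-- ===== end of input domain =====

-- B replaces A's sequential stateful scan by a divide-and-conquer over signed-delta segments
-- combining (zero-count, segment displacement); objective: alternative.


-- ===== PORT A =====
-- one loop step of A: from (curr_position, num_zeros) via item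
def part1Step (st : Int × Int) (item : String × Int) : Int × Int :=
  let modded := PySem.Int.mod item.2 100
  let curr :=
    if item.1 == "R" then st.1 + modded
    else
      let temp := st.1 - modded
      if temp < 0 then temp + 100 else temp
  let curr := PySem.Int.mod curr 100
  (curr, if curr == 0 then st.2 + 1 else st.2)

def part1 (input : List (String × Int)) : Int :=
  (input.foldl part1Step (50, 0)).2

-- ===== PORT B =====
-- Source B: signed delta of one move (n % 100 for 'R', -(n % 100) otherwise)
def part1Delta (p : String × Int) : Int :=
  if p.1 == "R" then PySem.Int.mod p.2 100 else -(PySem.Int.mod p.2 100)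

-- Source B's solve: split the segment in half, solve each half, combine
def part1Solve : List Int → Int → Int × Int
  | [], _ => (0, 0)
  | [d], start => (if PySem.Int.mod (start + d) 100 == 0 then 1 else 0, d)
  | d1 :: d2 :: rest, start =>
      let ds := d1 :: d2 :: rest
      let mid := ds.length / 2
      let r1 := part1Solve (ds.take mid) start
      let r2 := part1Solve (ds.drop mid) (start + r1.2)
      (r1.1 + r2.1, r1.2 + r2.2)
  termination_by ds _ => ds.length
  decreasing_by
    · simp [List.length_take]; omega
    · simp; omega

def part1_alt (input : List (String × Int)) : Int :=
  (part1Solve (input.map part1Delta) 50).1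

-- ===== PRECONDITION & SPEC =====
def Spec_part1 (input : List (String × Int)) (out : Int) : Prop := out = part1_alt input
instance (input : List (String × Int)) (out : Int) : Decidable (Spec_part1 input out) := by unfold Spec_part1; infer_instance

-- ===== CLAIM (what is proved, stated in full; the proofs are below) =====
def Claim_equal_part1 : Prop := ∀ (input : List (String × Int)), Dom_part1 input → Spec_part1 input (part1 input)

-- ===== LEMMAS AND PROOFS =====

-- sequential reference: number of prefixes of ds whose end position ≡ 0 (mod 100) from start
def part1Z : List Int → Int → Int
  | [], _ => 0
  | d :: t, s => (if PySem.Int.mod (s + d) 100 == 0 then 1 else 0) + part1Z t (s + d)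

theorem part1Z_append (l1 l2 : List Int) : ∀ s,
    part1Z (l1 ++ l2) s = part1Z l1 s + part1Z l2 (s + l1.sum) := by
  induction l1 with
  | nil => intro s; simp [part1Z]
  | cons d t ih =>
    intro s
    simp only [List.cons_append, part1Z, ih, List.sum_cons]
    ring_nf

theorem part1Solve_eq (ds : List Int) (s : Int) :
    part1Solve ds s = (part1Z ds s, ds.sum) := by
  induction ds, s using part1Solve.induct with
  | case1 s => simp [part1Solve, part1Z]
  | case2 d s => simp [part1Solve, part1Z]
  | case3 d1 d2 rest s ds mid r1 ih1 ih1' ih2 =>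
    rw [part1Solve]
    rw [ih2, ih1']
    have h := List.take_append_drop ((d1 :: d2 :: rest).length / 2) (d1 :: d2 :: rest)
    conv_rhs => rw [← h]
    rw [part1Z_append, List.sum_append]
    simp only [Prod.mk.injEq]
    constructor
    · simp only [ds, mid, r1, ih1, List.length_cons]
    · simp only [ds, mid, List.length_cons, ← List.sum_append, List.take_append_drop]

theorem part1_step_eq (st : Int × Int) (item : String × Int) (s : Int)
    (hst : st.1 = PySem.Int.mod s 100) :
    part1Step st item =
      (PySem.Int.mod (s + part1Delta item) 100,
       if PySem.Int.mod (s + part1Delta item) 100 == 0 then st.2 + 1 else st.2) := by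
  unfold part1Step part1Delta
  by_cases h : item.1 == "R"
  · simp only [h, if_true, hst]
    have hc : PySem.Int.mod (PySem.Int.mod s 100 + PySem.Int.mod item.2 100) 100
        = PySem.Int.mod (s + PySem.Int.mod item.2 100) 100 := by
      simp only [PySem.Int.mod_eq_emod_of_pos (by norm_num : (0:Int) < 100)]; omega
    rw [hc]
  · simp only [h, Bool.false_eq_true, if_false, hst]
    have hc : PySem.Int.mod
        (if PySem.Int.mod s 100 - PySem.Int.mod item.2 100 < 0
         then PySem.Int.mod s 100 - PySem.Int.mod item.2 100 + 100
         else PySem.Int.mod s 100 - PySem.Int.mod item.2 100) 100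
        = PySem.Int.mod (s + -(PySem.Int.mod item.2 100)) 100 := by
      simp only [PySem.Int.mod_eq_emod_of_pos (by norm_num : (0:Int) < 100)]
      split_ifs <;> omega
    rw [hc]

theorem part1_loop_eq (l : List (String × Int)) : ∀ (s count : Int),
    (l.foldl part1Step (PySem.Int.mod s 100, count)).2 =
      count + part1Z (l.map part1Delta) s := by
  induction l with
  | nil => intro s count; simp [part1Z]
  | cons item rest ih =>
    intro s count
    rw [List.foldl_cons,
      part1_step_eq (PySem.Int.mod s 100, count) item s rfl,
      ih (s + part1Delta item)]
    simp only [List.map_cons, part1Z]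
    split_ifs with h <;> ring

-- ===== VERDICT (by name: the statement is the Claim_ definition above) =====
theorem part1_spec : Claim_equal_part1 := by
  intro input _
  show part1 input = part1_alt input
  unfold part1 part1_alt
  rw [part1Solve_eq]
  have h50 : ((50 : Int), (0 : Int)) = (PySem.Int.mod 50 100, 0) := by decide
  rw [h50, part1_loop_eq input 50 0]
  simp
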